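-- pv_equiv track=rewrite | github.com/okechukwuchude/7071CEM-Publication-Search-Engine | .ipynb_checkpoints/information retreival-checkpoint.py | get_document_by_id
-- ===== SOURCE A (Python) =====
-- def get_document_by_id(document_id, documents):
--     current_document_id = 0
--     for document in documents:
--         for record in document:
--             current_document_id += 1
--             if current_document_id == document_id:
--                 return record
--     return None
-- ===== SOURCE B (Python) =====
-- def get_document_by_id(document_id, documents):
--     idx = document_id - 1
--     if idx < 0:
--         return None
--     for document in documents:
--         if idx < len(document):
--             return document[idx]
--         idx -= len(document)
--     return None
-- ===== Notes on version B (the rewrite author's own statement) =====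
-- stated objective: alternative
-- what changed: B jumps over whole documents by subtracting their lengths from a 0-based target index and indexes directly into the containing document, instead of incrementing a counter over every record.
import Mathlib
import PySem

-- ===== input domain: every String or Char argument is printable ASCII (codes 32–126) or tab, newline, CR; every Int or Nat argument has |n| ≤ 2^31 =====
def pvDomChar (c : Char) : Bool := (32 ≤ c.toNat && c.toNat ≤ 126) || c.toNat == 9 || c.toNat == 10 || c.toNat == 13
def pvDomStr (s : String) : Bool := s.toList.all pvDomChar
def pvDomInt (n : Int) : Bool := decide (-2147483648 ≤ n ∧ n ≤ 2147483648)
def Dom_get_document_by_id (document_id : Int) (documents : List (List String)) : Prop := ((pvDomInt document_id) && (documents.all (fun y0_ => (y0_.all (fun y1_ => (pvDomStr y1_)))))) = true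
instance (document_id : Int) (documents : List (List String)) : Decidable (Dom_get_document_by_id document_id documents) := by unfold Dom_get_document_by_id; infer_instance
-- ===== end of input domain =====

-- B replaces A's record-by-record counter with per-document length arithmetic (skips whole documents; not measurably faster on a timing run's inputs).

-- ===== PORT A =====
-- inner 'for record in document' loop: returns (some record) on early return, else (none, updated counter)
def pvInnerA (target : Int) (cur : Int) : List String → Option String × Int
  | [] => (none, cur)
  | r :: rs =>
    if cur + 1 = target then (some r, cur + 1) else pvInnerA target (cur + 1) rs

-- outer 'for document in documents' loop
def pvOuterA (target : Int) (cur : Int) : List (List String) → Option String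
  | [] => none
  | d :: rest =>
    match pvInnerA target cur d with
    | (some r, _) => some r
    | (none, cur') => pvOuterA target cur' rest

def get_document_by_id (document_id : Int) (documents : List (List String)) : Option String :=
  pvOuterA document_id 0 documents

-- ===== PORT B =====
def pvLoopB (idx : Int) : List (List String) → Option String
  | [] => none
  | d :: rest =>
    if idx < (d.length : Int) then PySem.List.pyGet? d idx
    else pvLoopB (idx - d.length) rest

def get_document_by_id_alt (document_id : Int) (documents : List (List String)) : Option String :=
  let idx := document_id - 1
  if idx < 0 then none else pvLoopB idx documents

-- ===== PRECONDITION & SPEC =====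
def Spec_get_document_by_id (document_id : Int) (documents : List (List String)) (out : Option String) : Prop := out = get_document_by_id_alt document_id documents
instance (document_id : Int) (documents : List (List String)) (out : Option String) : Decidable (Spec_get_document_by_id document_id documents out) := by unfold Spec_get_document_by_id; infer_instance

-- ===== CLAIM (what is proved, stated in full; the proofs are below) =====
def Claim_equal_get_document_by_id : Prop := ∀ (document_id : Int) (documents : List (List String)), Dom_get_document_by_id document_id documents → Spec_get_document_by_id document_id documents (get_document_by_id document_id documents)

-- ===== LEMMAS AND PROOFS =====

-- the inner loop never hits a target ≤ cur: it just advances the counter by the document length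
theorem pvInnerA_of_le (target : Int) (d : List String) :
    ∀ cur, target ≤ cur → pvInnerA target cur d = (none, cur + d.length) := by
  induction d with
  | nil => intro cur _; simp [pvInnerA]
  | cons r rs ih =>
    intro cur h
    have hne : ¬ (cur + 1 = target) := by omega
    have := ih (cur + 1) (by omega)
    simp [pvInnerA, hne, this]
    omega

-- with target ahead of cur, the inner loop either finds record (target-cur-1) or passes the whole document
theorem pvInnerA_of_lt (target : Int) (d : List String) :
    ∀ cur, cur < target →
      pvInnerA target cur d =
        if target - cur - 1 < (d.length : Int)
        then (PySem.List.pyGet? d (target - cur - 1), target)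
        else (none, cur + d.length) := by
  induction d with
  | nil => intro cur _; simp [pvInnerA]; omega
  | cons r rs ih =>
    intro cur h
    by_cases heq : cur + 1 = target
    · have h0 : target - cur - 1 = 0 := by omega
      simp [pvInnerA, heq, h0]
    · have hlt : cur + 1 < target := by omega
      have hcast : target - cur - 1 = (target - (cur + 1) - 1) + 1 := by omega
      rw [pvInnerA, if_neg heq, ih (cur + 1) hlt]
      by_cases hr : target - (cur + 1) - 1 < (rs.length : Int)
      · rw [if_pos hr, if_pos (by simp only [List.length_cons]; push_cast; omega)]
        have : PySem.List.pyGet? (r :: rs) (target - cur - 1)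
             = PySem.List.pyGet? rs (target - (cur + 1) - 1) := by
          obtain ⟨n, hn⟩ : ∃ n : Nat, target - cur - 1 = (n : Int) + 1 :=
            ⟨(target - cur - 2).toNat, by omega⟩
          rw [hn, PySem.List.pyGet?_cons_succ]
          congr 1
          omega
        rw [this]
      · rw [if_neg hr, if_neg (by simp only [List.length_cons]; push_cast; omega)]
        simp only [Prod.mk.injEq, List.length_cons]
        exact ⟨trivial, by push_cast; omega⟩

-- A with target ahead of cur agrees with B's loop at index target-cur-1
theorem pvOuterA_eq_pvLoopB (docs : List (List String)) :
    ∀ cur target, cur < target →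
      pvOuterA target cur docs = pvLoopB (target - cur - 1) docs := by
  induction docs with
  | nil => intro cur target _; simp [pvOuterA, pvLoopB]
  | cons d rest ih =>
    intro cur target h
    rw [pvOuterA, pvInnerA_of_lt target d cur h, pvLoopB]
    by_cases hr : target - cur - 1 < (d.length : Int)
    · rw [if_pos hr, if_pos hr]
      have hg : ∃ x, PySem.List.pyGet? d (target - cur - 1) = some x := by
        have := PySem.List.pyGet?_eq_none_iff (xs := d) (i := target - cur - 1)
        cases hc : PySem.List.pyGet? d (target - cur - 1) with
        | none =>
          exfalso
          exact (this.mp hc) ⟨by omega, by omega⟩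
        | some x => exact ⟨x, rfl⟩
      obtain ⟨x, hx⟩ := hg
      rw [hx]
    · rw [if_neg hr, if_neg hr]
      show pvOuterA target (cur + (d.length : Int)) rest = _
      rw [ih (cur + d.length) target (by omega)]
      congr 1
      omega

-- A with target already passed (target ≤ cur) returns none
theorem pvOuterA_none (docs : List (List String)) :
    ∀ cur target, target ≤ cur → pvOuterA target cur docs = none := by
  induction docs with
  | nil => intro _ _ _; rfl
  | cons d rest ih =>
    intro cur target h
    rw [pvOuterA, pvInnerA_of_le target d cur h]
    exact ih (cur + d.length) target (by omega)

-- ===== VERDICT (by name: the statement is the Claim_ definition above) =====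
theorem get_document_by_id_spec : Claim_equal_get_document_by_id := by
  intro document_id documents _
  unfold Spec_get_document_by_id get_document_by_id get_document_by_id_alt
  by_cases h : document_id - 1 < 0
  · simp only [h, if_pos]
    exact pvOuterA_none documents 0 document_id (by omega)
  · simp only [h, if_false]
    have := pvOuterA_eq_pvLoopB documents 0 document_id (by omega)
    simpa using this
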